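-- pv_equiv track=rewrite | github.com/toopa2002/influxgraph | graphite_influxdb/utils.py | calculate_interval
-- ===== SOURCE A (Python) =====
-- def calculate_interval(start_time, end_time):
--     """Calculates wanted data series interval according to start and end times
--
--     Returns interval in seconds
--     :param start_time: Start time in seconds from epoch
--     :param end_time: End time in seconds from epoch"""
--     time_delta = end_time - start_time
--     deltas = {
--         # # 1 hour -> 1s
--         # 3600 : 1,
--         # # 1 day -> 30s
--         # 86400 : 30,
--         # 3 days -> 1min
--         259200 : 60,
--         # 7 days -> 5min
--         604800 : 300,
--         # 14 days -> 10min
--         1209600 : 600,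
--         # 28 days -> 15min
--         2419200 : 900,
--         # 2 months -> 30min
--         4838400 : 1800,
--         # 4 months -> 1hour
--         9676800 : 3600,
--         # 12 months -> 3hours
--         31536000 : 7200,
--         # 4 years -> 12hours
--         126144000 : 43200,
--         }
--     for delta in sorted(deltas.keys()):
--         if time_delta <= delta:
--             return deltas[delta]
--     # 1 day default, or if time range > 4 year
--     return 86400
-- ===== SOURCE B (Python) =====
-- _KEYS = [259200, 604800, 1209600, 2419200, 4838400, 9676800, 31536000, 126144000]
-- # intervals for each threshold, with the 86400 default appended at the end
-- _VALS = [60, 300, 600, 900, 1800, 3600, 7200, 43200, 86400]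
--
--
-- def calculate_interval(start_time, end_time):
--     time_delta = end_time - start_time
--     # binary search: leftmost index with _KEYS[i] >= time_delta (bisect_left)
--     lo, hi = 0, len(_KEYS)
--     while lo < hi:
--         mid = (lo + hi) // 2
--         if _KEYS[mid] < time_delta:
--             lo = mid + 1
--         else:
--             hi = mid
--     return _VALS[lo]
-- ===== Notes on version B (the rewrite author's own statement) =====
-- stated objective: alternative
-- what changed: Replaces the dict build + sort + linear scan over thresholds with a hand-written bisect_left binary search over a precomputed sorted key list and a parallel value list (default appended as the last value).
import Mathlib
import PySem

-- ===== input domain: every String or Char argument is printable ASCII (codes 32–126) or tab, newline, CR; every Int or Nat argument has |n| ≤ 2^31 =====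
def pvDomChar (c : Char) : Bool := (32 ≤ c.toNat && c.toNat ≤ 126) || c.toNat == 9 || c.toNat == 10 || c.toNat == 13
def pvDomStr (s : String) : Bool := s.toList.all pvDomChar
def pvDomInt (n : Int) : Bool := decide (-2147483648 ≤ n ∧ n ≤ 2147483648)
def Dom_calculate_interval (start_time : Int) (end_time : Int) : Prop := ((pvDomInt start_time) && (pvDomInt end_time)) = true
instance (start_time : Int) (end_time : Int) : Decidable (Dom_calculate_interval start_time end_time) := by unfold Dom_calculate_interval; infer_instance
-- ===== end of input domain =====

-- B replaces A's per-call dict build + sort + linear scan with a bisect_left binary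
-- search over a precomputed sorted key list and a parallel value list (objective: alternative).

-- ===== PORT A =====
-- the literal dict A builds (insertion order as written)
def pvDeltas : PySem.Dict Int Int :=
  PySem.Dict.ofList [(259200, 60), (604800, 300), (1209600, 600), (2419200, 900),
                     (4838400, 1800), (9676800, 3600), (31536000, 7200), (126144000, 43200)]

-- the 'for delta in sorted(deltas.keys()): if time_delta <= delta: return deltas[delta]'
-- loop; delta always comes from the dict's keys, so getD 0 is exact for deltas[delta]
def pvALoop (time_delta : Int) : List Int → Int
  | [] => 86400
  | d :: rest => if time_delta ≤ d then PySem.Dict.getD pvDeltas d 0 else pvALoop time_delta rest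

def calculate_interval (start_time : Int) (end_time : Int) : Int :=
  let time_delta := end_time - start_time
  pvALoop time_delta (PySem.List.sorted pvDeltas.keys (fun x => x) false)

-- ===== PORT B =====
def pvKeys : List Int := [259200, 604800, 1209600, 2419200, 4838400, 9676800, 31536000, 126144000]
def pvVals : List Int := [60, 300, 600, 900, 1800, 3600, 7200, 43200, 86400]

-- Source B's 'while lo < hi' bisect_left loop; fuel = hi - lo bounds the iterations (the
-- loop shrinks hi - lo every round, so the initial hi - lo is always enough fuel);
-- all list indices are in range, so getD 0 is exact
def pvBisectGo (time_delta : Int) : Nat → Nat → Nat → Nat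
  | 0, lo, _ => lo
  | fuel + 1, lo, hi =>
    if lo < hi then
      let mid := (lo + hi) / 2
      if pvKeys.getD mid 0 < time_delta then pvBisectGo time_delta fuel (mid + 1) hi
      else pvBisectGo time_delta fuel lo mid
    else lo

def pvBisect (time_delta : Int) (lo hi : Nat) : Nat :=
  pvBisectGo time_delta (hi - lo) lo hi

def calculate_interval_alt (start_time : Int) (end_time : Int) : Int :=
  let time_delta := end_time - start_time
  pvVals.getD (pvBisect time_delta 0 pvKeys.length) 0

-- ===== PRECONDITION & SPEC =====
def Spec_calculate_interval (start_time : Int) (end_time : Int) (out : Int) : Prop := out = calculate_interval_alt start_time end_time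
instance (start_time : Int) (end_time : Int) (out : Int) : Decidable (Spec_calculate_interval start_time end_time out) := by unfold Spec_calculate_interval; infer_instance

-- ===== CLAIM (what is proved, stated in full; the proofs are below) =====
def Claim_equal_calculate_interval : Prop := ∀ (start_time : Int) (end_time : Int), Dom_calculate_interval start_time end_time → Spec_calculate_interval start_time end_time (calculate_interval start_time end_time)

-- ===== LEMMAS AND PROOFS =====

-- sorting the dict's keys yields exactly B's precomputed key list
theorem pv_sorted_keys : PySem.List.sorted pvDeltas.keys (fun x => x) false = pvKeys := by
  decide

-- A's scan as a closed case split on the time delta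
theorem pv_aloop_spec (t : Int) : pvALoop t pvKeys =
    if t ≤ 259200 then 60 else if t ≤ 604800 then 300 else if t ≤ 1209600 then 600
    else if t ≤ 2419200 then 900 else if t ≤ 4838400 then 1800 else if t ≤ 9676800 then 3600
    else if t ≤ 31536000 then 7200 else if t ≤ 126144000 then 43200 else 86400 := by
  have g1 : PySem.Dict.getD pvDeltas 259200 0 = 60 := by decide
  have g2 : PySem.Dict.getD pvDeltas 604800 0 = 300 := by decide
  have g3 : PySem.Dict.getD pvDeltas 1209600 0 = 600 := by decide
  have g4 : PySem.Dict.getD pvDeltas 2419200 0 = 900 := by decide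
  have g5 : PySem.Dict.getD pvDeltas 4838400 0 = 1800 := by decide
  have g6 : PySem.Dict.getD pvDeltas 9676800 0 = 3600 := by decide
  have g7 : PySem.Dict.getD pvDeltas 31536000 0 = 7200 := by decide
  have g8 : PySem.Dict.getD pvDeltas 126144000 0 = 43200 := by decide
  simp only [pvALoop, pvKeys, g1, g2, g3, g4, g5, g6, g7, g8]

-- B's binary search as the same case split, returning the index bisect_left finds
set_option maxHeartbeats 2000000 in
theorem pv_bisect_spec (t : Int) : pvBisect t 0 pvKeys.length =
    if t ≤ 259200 then 0 else if t ≤ 604800 then 1 else if t ≤ 1209600 then 2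
    else if t ≤ 2419200 then 3 else if t ≤ 4838400 then 4 else if t ≤ 9676800 then 5
    else if t ≤ 31536000 then 6 else if t ≤ 126144000 then 7 else 8 := by
  simp only [pvBisect, pvKeys, List.length]
  norm_num
  simp only [pvBisectGo, List.getD, pvKeys]
  norm_num
  split_ifs <;> omega

-- ===== VERDICT (by name: the statement is the Claim_ definition above) =====
theorem calculate_interval_spec : Claim_equal_calculate_interval := by
  intro s e _
  simp only [Spec_calculate_interval, calculate_interval, calculate_interval_alt]
  rw [pv_sorted_keys, pv_aloop_spec, pv_bisect_spec]
  split_ifs <;> rfl
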